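-- pv_equiv track=rewrite | github.com/kienmarkdo/Mining-anagrams-and-Scrabble-Help | anagrams_and_scrabble.py | word_anagrams
-- ===== SOURCE A (Python) =====
-- def word_anagrams(word, wordbook):
--     '''(str, list of str) -> list of str
--     - word est une chaine de caractere qui represente un mot
--     - wordbook est une liste des mots (sans des mots repetes)
--
--     La fonction retourne une liste des anagrammes de mot word dans la liste wordbook
--     Il faut utiliser la foction test_letters
--
--     >>> word_anagrams("liste", wordbook)
--     ['lites']
--     >>> word_anagrams("lapin", wordbook)
--     ['alpin', 'plain']
--     >>> word_anagrams("elephant", wordbook)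
--     []
--     '''
--     l_anagrams = list()
--     if word not in wordbook:
--         return l_anagrams
--     for i in range(len(wordbook)):
--         if len(word) == len(wordbook[i]) and word != wordbook[i] and sorted(word) == sorted(wordbook[i]):
--             l_anagrams.append(wordbook[i])
--     return l_anagrams
-- ===== SOURCE B (Python) =====
-- def word_anagrams(word, wordbook):
--     if word not in wordbook:
--         return []
--     buckets = {}
--     for w in wordbook:
--         k = tuple(sorted(w))
--         buckets[k] = buckets.get(k, []) + [w]
--     return [w for w in buckets.get(tuple(sorted(word)), []) if w != word]
-- ===== Notes on version B (the rewrite author's own statement) =====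
-- stated objective: alternative
-- what changed: Instead of re-sorting and comparing every wordbook entry against the query inline, B groups the wordbook once into an anagram index keyed by the sorted letter tuple and answers with a single bucket lookup, filtering out the word itself.
import Mathlib
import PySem

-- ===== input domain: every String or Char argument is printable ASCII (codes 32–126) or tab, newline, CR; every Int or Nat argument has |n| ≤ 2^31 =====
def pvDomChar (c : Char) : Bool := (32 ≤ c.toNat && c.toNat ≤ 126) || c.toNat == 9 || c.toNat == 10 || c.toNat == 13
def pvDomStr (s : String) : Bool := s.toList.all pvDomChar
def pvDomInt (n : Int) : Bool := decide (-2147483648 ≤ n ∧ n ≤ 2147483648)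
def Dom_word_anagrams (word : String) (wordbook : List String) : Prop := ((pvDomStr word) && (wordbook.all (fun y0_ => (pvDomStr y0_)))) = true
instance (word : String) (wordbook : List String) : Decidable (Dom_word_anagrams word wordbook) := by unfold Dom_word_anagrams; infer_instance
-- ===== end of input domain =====

-- B builds an anagram index (sorted-letters key -> bucket of words) once and answers with one
-- bucket lookup, instead of A's inline per-entry sorted-comparison; objective: alternative.

-- sorted(w) for a string w (shared helper: both Pythons call sorted on the characters)
def waKey (w : String) : List Char := PySem.List.sorted w.toList (fun c => c) false

-- ===== PORT A =====
def word_anagrams (word : String) (wordbook : List String) : List String :=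
  let l_anagrams : List String := []
  if wordbook.contains word = false then l_anagrams
  else
    (PySem.List.pyRange 0 (wordbook.length : Int) 1).foldl
      (fun acc i =>
        let wi := PySem.List.pyGetD wordbook i ""
        if PySem.Str.len word = PySem.Str.len wi ∧ word ≠ wi ∧ waKey word = waKey wi
        then acc ++ [wi] else acc)
      l_anagrams

-- ===== PORT B =====
def word_anagrams_alt (word : String) (wordbook : List String) : List String :=
  if wordbook.contains word = false then []
  else
    let buckets : PySem.Dict (List Char) (List String) :=
      wordbook.foldl (fun d w => d.insert (waKey w) (d.getD (waKey w) [] ++ [w]))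
        PySem.Dict.empty
    (buckets.getD (waKey word) []).filter (fun w => w != word)

-- ===== PRECONDITION & SPEC =====
def Spec_word_anagrams (word : String) (wordbook : List String) (out : List String) : Prop := out = word_anagrams_alt word wordbook
instance (word : String) (wordbook : List String) (out : List String) : Decidable (Spec_word_anagrams word wordbook out) := by unfold Spec_word_anagrams; infer_instance

-- ===== CLAIM (what is proved, stated in full; the proofs are below) =====
def Claim_equal_word_anagrams : Prop := ∀ (word : String) (wordbook : List String), Dom_word_anagrams word wordbook → Spec_word_anagrams word wordbook (word_anagrams word wordbook)

-- ===== LEMMAS AND PROOFS =====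

-- the index lookup returns exactly the wordbook entries whose sorted key is k, in order
lemma waBucket (l : List String) (d : PySem.Dict (List Char) (List String)) (k : List Char) :
    (l.foldl (fun d w => d.insert (waKey w) (d.getD (waKey w) [] ++ [w])) d).getD k []
      = d.getD k [] ++ l.filter (fun w => waKey w == k) := by
  induction l generalizing d with
  | nil => simp
  | cons w t ih =>
    simp only [List.foldl_cons, ih, List.filter_cons]
    by_cases h : waKey w = k
    · subst h
      simp [PySem.Dict.getD_insert_self]
    · rw [PySem.Dict.getD_insert_of_ne]
      · simp [h]
      · exact Ne.symm h

-- equal sorted keys force equal lengths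
lemma waKey_len {v w : String} (h : waKey v = waKey w) : PySem.Str.len v = PySem.Str.len w := by
  have := congrArg List.length h
  simp only [waKey, PySem.List.length_sorted] at this
  simp [PySem.Str.len_eq, this]

theorem word_anagrams_spec : Claim_equal_word_anagrams := by
  intro word wordbook _
  unfold Spec_word_anagrams word_anagrams word_anagrams_alt
  by_cases hm : word ∈ wordbook
  · simp only [List.contains_eq_mem, hm, decide_true, Bool.true_eq_false, if_false]
    rw [PySem.List.foldl_pyRange_zero_pyGetD' wordbook ""
      (fun acc wi => if PySem.Str.len word = PySem.Str.len wi ∧ word ≠ wi ∧ waKey word = waKey wi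
        then acc ++ [wi] else acc) []]
    rw [PySem.List.foldl_append_ite_eq_filter, waBucket]
    simp only [PySem.Dict.empty, PySem.Dict.getD, PySem.Dict.get?, List.find?_nil, Option.map_none, Option.getD_none, List.nil_append]
    rw [List.filter_filter]
    apply List.filter_congr
    intro w _
    by_cases hk : waKey word = waKey w
    · have hsl : PySem.Str.len word = PySem.Str.len w := waKey_len hk
      by_cases hw : word = w
      · simp [hw]
      · have hlen : word.length = w.length := by
          have h2 := hsl
          rw [PySem.Str.len_eq, PySem.Str.len_eq] at h2
          exact_mod_cast h2
        simp [hk.symm, hw, hlen, bne_iff_ne, Ne.symm hw]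
    · have hk' : waKey w ≠ waKey word := Ne.symm hk
      simp [hk, hk']
  · simp only [List.contains_eq_mem, hm, decide_false, reduceIte]
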